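-- pv_equiv track=rewrite | github.com/alvarosc2000/python-full | code_test/suma_vec_matriz.py | sumaMatriz
-- ===== SOURCE A (Python) =====
-- def sumaMatriz(matriz):
--     filas = len(matriz)
--     columnas = len(matriz[0])
--     resultado = []
--
--     for fila in range(filas):
--         for columna in range(columnas):
--             suma = 0
--             # vecinos verticales y horizontales
--             if fila > 0:
--                 suma += matriz[fila-1][columna]       # arriba
--             if fila < filas-1:
--                 suma += matriz[fila+1][columna]       # abajo
--             if columna > 0:
--                 suma += matriz[fila][columna-1]       # izquierda
--             if columna < columnas-1:
--                 suma += matriz[fila][columna+1]       # derecha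
--
--             # vecinos diagonales
--             if fila > 0 and columna > 0:
--                 suma += matriz[fila-1][columna-1]     # arriba-izquierda
--             if fila > 0 and columna < columnas-1:
--                 suma += matriz[fila-1][columna+1]     # arriba-derecha
--             if fila < filas-1 and columna > 0:
--                 suma += matriz[fila+1][columna-1]     # abajo-izquierda
--             if fila < filas-1 and columna < columnas-1:
--                 suma += matriz[fila+1][columna+1]     # abajo-derecha
--
--             resultado.append(suma)
--
--     return resultado
-- ===== SOURCE B (Python) =====
-- def sumaMatriz(matriz):
--     filas = len(matriz)
--     columnas = len(matriz[0])
--     # stage 1: horizontal 3-window sums per row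
--     horiz = []
--     for fila in matriz:
--         horiz.append([sum(fila[k] for k in range(max(j - 1, 0), min(j + 2, columnas)))
--                       for j in range(columnas)])
--     # stage 2: combine vertically, subtract the center
--     resultado = []
--     for i in range(filas):
--         for j in range(columnas):
--             total = -matriz[i][j]
--             for r in range(max(i - 1, 0), min(i + 2, filas)):
--                 total += horiz[r][j]
--             resultado.append(total)
--     return resultado
-- ===== Notes on version B (the rewrite author's own statement) =====
-- stated objective: alternative
-- what changed: Separable two-stage computation: a first pass builds a table of horizontal 3-window sums per row, a second pass adds the 2-3 relevant table entries per cell and subtracts the center, replacing A's single pass with eight per-cell directional conditionals.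
import Mathlib
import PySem

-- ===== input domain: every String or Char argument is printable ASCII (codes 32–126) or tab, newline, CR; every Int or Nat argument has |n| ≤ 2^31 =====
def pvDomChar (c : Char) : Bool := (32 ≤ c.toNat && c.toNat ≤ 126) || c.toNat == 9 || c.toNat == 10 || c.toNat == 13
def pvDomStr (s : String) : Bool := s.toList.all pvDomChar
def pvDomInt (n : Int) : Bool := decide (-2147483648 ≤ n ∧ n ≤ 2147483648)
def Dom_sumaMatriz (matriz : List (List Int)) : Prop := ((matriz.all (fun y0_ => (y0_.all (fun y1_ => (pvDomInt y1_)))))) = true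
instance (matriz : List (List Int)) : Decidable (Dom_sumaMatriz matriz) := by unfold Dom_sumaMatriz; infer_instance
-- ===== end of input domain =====

-- B computes the same neighbor sums by a separable two-stage pass (a table of horizontal
-- 3-window sums per row, then a vertical combine minus the center) instead of A's single
-- pass with eight per-cell directional conditionals (objective: alternative).

-- ===== PORT A =====
-- matriz[i][j] with default (indices always in range under Pre_)
def pvGet (matriz : List (List Int)) (i j : Int) : Int :=
  PySem.List.pyGetD (PySem.List.pyGetD matriz i []) j 0

def sumaMatriz (matriz : List (List Int)) : List Int :=
  let filas : Int := matriz.length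
  let columnas : Int := (PySem.List.pyGetD matriz 0 []).length
  (PySem.List.pyRange 0 filas 1).foldl (fun resultado fila =>
    (PySem.List.pyRange 0 columnas 1).foldl (fun resultado columna =>
      let suma : Int := 0
      let suma := if fila > 0 then suma + pvGet matriz (fila-1) columna else suma
      let suma := if fila < filas-1 then suma + pvGet matriz (fila+1) columna else suma
      let suma := if columna > 0 then suma + pvGet matriz fila (columna-1) else suma
      let suma := if columna < columnas-1 then suma + pvGet matriz fila (columna+1) else suma
      let suma := if fila > 0 ∧ columna > 0 then suma + pvGet matriz (fila-1) (columna-1) else suma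
      let suma := if fila > 0 ∧ columna < columnas-1 then suma + pvGet matriz (fila-1) (columna+1) else suma
      let suma := if fila < filas-1 ∧ columna > 0 then suma + pvGet matriz (fila+1) (columna-1) else suma
      let suma := if fila < filas-1 ∧ columna < columnas-1 then suma + pvGet matriz (fila+1) (columna+1) else suma
      resultado ++ [suma]) resultado) []

-- ===== PORT B =====
-- the inner comprehension entry: sum(fila[k] for k in range(max(j-1,0), min(j+2,columnas)))
def pvHS (fila : List Int) (columnas j : Int) : Int :=
  (PySem.List.pyRange (max (j-1) 0) (min (j+2) columnas) 1).foldl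
    (fun s k => s + PySem.List.pyGetD fila k 0) 0

def sumaMatriz_alt (matriz : List (List Int)) : List Int :=
  let filas : Int := matriz.length
  let columnas : Int := (PySem.List.pyGetD matriz 0 []).length
  -- stage 1: horizontal 3-window sums per row
  let horiz : List (List Int) := matriz.foldl (fun horiz fila =>
    horiz ++ [(PySem.List.pyRange 0 columnas 1).map (fun j => pvHS fila columnas j)]) []
  -- stage 2: combine vertically, subtract the center
  (PySem.List.pyRange 0 filas 1).foldl (fun resultado i =>
    (PySem.List.pyRange 0 columnas 1).foldl (fun resultado j =>
      let total : Int := -(pvGet matriz i j)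
      let total := (PySem.List.pyRange (max (i-1) 0) (min (i+2) filas) 1).foldl
        (fun t r => t + PySem.List.pyGetD (PySem.List.pyGetD horiz r []) j 0) total
      resultado ++ [total]) resultado) []

-- ===== PRECONDITION & SPEC =====
-- Pre_ excludes exactly the inputs where the Python A raises IndexError: the empty matrix
-- (matriz[0]) and matrices where some accessed row is shorter than len(matriz[0]).
def Pre_sumaMatriz (matriz : List (List Int)) : Prop :=
  matriz ≠ [] ∧ ∀ r ∈ matriz, (matriz.headD []).length ≤ r.length
instance (matriz : List (List Int)) : Decidable (Pre_sumaMatriz matriz) := by unfold Pre_sumaMatriz; infer_instance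

def pvWitness_sumaMatriz : List (List Int) := [[1, 2], [3, 4]]

def Spec_sumaMatriz (matriz : List (List Int)) (out : List Int) : Prop := out = sumaMatriz_alt matriz
instance (matriz : List (List Int)) (out : List Int) : Decidable (Spec_sumaMatriz matriz out) := by unfold Spec_sumaMatriz; infer_instance

-- ===== CLAIM (what is proved, stated in full; the proofs are below) =====
def Claim_equal_sumaMatriz : Prop := ∀ (matriz : List (List Int)), Dom_sumaMatriz matriz → Pre_sumaMatriz matriz → Spec_sumaMatriz matriz (sumaMatriz matriz)

-- ===== LEMMAS AND PROOFS =====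

-- the 3-window range around m inside [0, k)
theorem pv_window (m k : Int) (h0 : 0 ≤ m) (h1 : m < k) :
    PySem.List.pyRange (max (m-1) 0) (min (m+2) k) 1 =
      (if 0 < m then [m-1] else []) ++ [m] ++ (if m < k-1 then [m+1] else []) := by
  by_cases hl : 0 < m <;> by_cases hr : m < k - 1 <;> simp only [hl, hr, if_true, if_false]
  · have ha : max (m-1) 0 = m-1 := by omega
    have hb : min (m+2) k = m+2 := by omega
    rw [ha, hb, PySem.List.pyRange_one_cons (by omega), PySem.List.pyRange_one_cons (by omega),
        PySem.List.pyRange_one_cons (by omega), PySem.List.pyRange_one_eq_nil (by omega)]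
    simp
  · have ha : max (m-1) 0 = m-1 := by omega
    have hb : min (m+2) k = m+1 := by omega
    rw [ha, hb, PySem.List.pyRange_one_cons (by omega), PySem.List.pyRange_one_cons (by omega),
        PySem.List.pyRange_one_eq_nil (by omega)]
    simp
  · have hm : m = 0 := by omega
    have ha : max (m-1) 0 = 0 := by omega
    have hb : min (m+2) k = 2 := by omega
    rw [ha, hb, PySem.List.pyRange_one_cons (by omega), PySem.List.pyRange_one_cons (by omega),
        PySem.List.pyRange_one_eq_nil (by omega)]
    simp [hm]
  · have hm : m = 0 := by omega
    have ha : max (m-1) 0 = 0 := by omega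
    have hb : min (m+2) k = 1 := by omega
    rw [ha, hb, PySem.List.pyRange_one_cons (by omega), PySem.List.pyRange_one_eq_nil (by omega)]
    simp [hm]

-- the horizontal window sum, in closed form
theorem pvHS_eq (fila : List Int) (c j : Int) (h0 : 0 ≤ j) (h1 : j < c) :
    pvHS fila c j =
      (if 0 < j then PySem.List.pyGetD fila (j-1) 0 else 0) + PySem.List.pyGetD fila j 0 +
      (if j < c-1 then PySem.List.pyGetD fila (j+1) 0 else 0) := by
  unfold pvHS
  rw [pv_window j c h0 h1]
  by_cases hl : 0 < j <;> by_cases hr : j < c - 1 <;> simp [hl, hr, List.foldl] <;> try ring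

-- looking up the horiz table at a valid row index
theorem pv_horiz_get (matriz : List (List Int)) (c r : Int)
    (h0 : 0 ≤ r) (h1 : r < (matriz.length : Int)) (j : Int) (hj0 : 0 ≤ j) (hj1 : j < c) :
    PySem.List.pyGetD
      (PySem.List.pyGetD (matriz.map (fun fila => (PySem.List.pyRange 0 c 1).map (fun j => pvHS fila c j))) r []) j 0
      = pvHS (PySem.List.pyGetD matriz r []) c j := by
  have hr' : r.toNat < matriz.length := by omega
  have h2 : PySem.List.pyGetD (matriz.map (fun fila => (PySem.List.pyRange 0 c 1).map (fun j => pvHS fila c j))) r []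
      = (PySem.List.pyRange 0 c 1).map (fun j => pvHS (PySem.List.pyGetD matriz r []) c j) := by
    rw [PySem.List.pyGetD_eq_getElem _ _ h0 (by simpa using h1),
        PySem.List.pyGetD_eq_getElem _ _ h0 h1]
    simp
  rw [h2, PySem.List.pyGetD_map_pyRange_of_nonneg _ _ _ _ hj0 hj1]

-- per-cell equality: A's eight directional terms = B's vertical combine of window sums minus center
theorem pv_cell_eq (matriz : List (List Int)) (filas columnas i j : Int)
    (hf : filas = (matriz.length : Int))
    (h0 : 0 ≤ i) (h1 : i < filas) (h2 : 0 ≤ j) (h3 : j < columnas) :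
    (let suma : Int := 0
     let suma := if i > 0 then suma + pvGet matriz (i-1) j else suma
     let suma := if i < filas-1 then suma + pvGet matriz (i+1) j else suma
     let suma := if j > 0 then suma + pvGet matriz i (j-1) else suma
     let suma := if j < columnas-1 then suma + pvGet matriz i (j+1) else suma
     let suma := if i > 0 ∧ j > 0 then suma + pvGet matriz (i-1) (j-1) else suma
     let suma := if i > 0 ∧ j < columnas-1 then suma + pvGet matriz (i-1) (j+1) else suma
     let suma := if i < filas-1 ∧ j > 0 then suma + pvGet matriz (i+1) (j-1) else suma
     let suma := if i < filas-1 ∧ j < columnas-1 then suma + pvGet matriz (i+1) (j+1) else suma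
     suma) =
    (PySem.List.pyRange (max (i-1) 0) (min (i+2) filas) 1).foldl
      (fun t r => t + PySem.List.pyGetD
        (PySem.List.pyGetD (matriz.map (fun fila => (PySem.List.pyRange 0 columnas 1).map (fun j => pvHS fila columnas j))) r []) j 0)
      (-(pvGet matriz i j)) := by
  have hg : ∀ r, 0 ≤ r → r < filas →
      PySem.List.pyGetD
        (PySem.List.pyGetD (matriz.map (fun fila => (PySem.List.pyRange 0 columnas 1).map (fun j => pvHS fila columnas j))) r []) j 0
      = (if 0 < j then pvGet matriz r (j-1) else 0) + pvGet matriz r j +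
        (if j < columnas-1 then pvGet matriz r (j+1) else 0) := by
    intro r hr0 hr1
    rw [pv_horiz_get matriz columnas r hr0 (by omega) j h2 h3,
        pvHS_eq _ _ _ h2 h3]
    rfl
  rw [pv_window i filas h0 h1]
  by_cases hu : 0 < i <;> by_cases hd : i < filas - 1 <;>
    simp only [hu, hd, if_true, if_false] <;>
    simp only [List.nil_append, List.cons_append, List.foldl] <;>
    rw [hg i h0 (by omega)] <;>
    [ (rw [hg (i-1) (by omega) (by omega), hg (i+1) (by omega) (by omega)]);
      (rw [hg (i-1) (by omega) (by omega)]);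
      (rw [hg (i+1) (by omega) (by omega)]);
      skip ] <;>
    by_cases hl : 0 < j <;> by_cases hr : j < columnas - 1 <;>
      simp [hl, hr] <;> ring

-- ===== VERDICT (by name: the statement is the Claim_ definition above) =====
theorem sumaMatriz_spec : Claim_equal_sumaMatriz := by
  intro matriz _ _
  unfold Spec_sumaMatriz sumaMatriz sumaMatriz_alt
  simp only [PySem.List.foldl_append_singleton_eq_map, List.nil_append]
  apply PySem.List.foldl_congr_mem
  intro acc i hi
  congr 1
  apply List.map_congr_left
  intro j hj
  rw [PySem.List.mem_pyRange_one] at hi hj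
  exact pv_cell_eq matriz _ _ i j rfl hi.1 hi.2 hj.1 hj.2
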